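-- pv_equiv track=rewrite | github.com/suyogk23/DSA-solved | hackerrank: optimizing box weights.py | minimalHeaviestSetA
-- ===== SOURCE A (Python) =====
-- def minimalHeaviestSetA(arr):
--     # Write your code here
--     n = len(arr)
--     #sort arr: n log n
--     arr.sort()
--     # prefix sum
--     prefixSum = sum(arr)
--     # trasverse from last
--     subSetA = []
--     sumSubSetA = 0
--     for i in range(n-1, -1, -1):
--         if sumSubSetA <= prefixSum:
--             prefixSum -= arr[i]
--             sumSubSetA += arr[i]
--             subSetA = [arr[i]] + subSetA
--         else:
--             break
--     return subSetA
-- ===== SOURCE B (Python) =====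
-- # Drop-lightest-prefix: single forward pass over ascending prefix sums keeps the
-- # LAST index m with 2*p < total; returns arr[m:] (same in-place sort mutation as A).
-- def minimalHeaviestSetA(arr):
--     arr.sort()
--     total = sum(arr)
--     p = 0
--     m = 0
--     for i, x in enumerate(arr, 1):
--         p += x
--         if 2 * p < total:
--             m = i
--     return arr[m:]
-- ===== Notes on version B (the rewrite author's own statement) =====
-- stated objective: alternative
-- what changed: Instead of A's backward greedy take-while that accumulates the heaviest elements (prepending each into the result while tracking two running sums), B makes one forward pass over ascending prefix sums, records the last index m whose doubled prefix sum is still below the total (the heaviest droppable light prefix), and returns the slice arr[m:].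
import Mathlib
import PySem

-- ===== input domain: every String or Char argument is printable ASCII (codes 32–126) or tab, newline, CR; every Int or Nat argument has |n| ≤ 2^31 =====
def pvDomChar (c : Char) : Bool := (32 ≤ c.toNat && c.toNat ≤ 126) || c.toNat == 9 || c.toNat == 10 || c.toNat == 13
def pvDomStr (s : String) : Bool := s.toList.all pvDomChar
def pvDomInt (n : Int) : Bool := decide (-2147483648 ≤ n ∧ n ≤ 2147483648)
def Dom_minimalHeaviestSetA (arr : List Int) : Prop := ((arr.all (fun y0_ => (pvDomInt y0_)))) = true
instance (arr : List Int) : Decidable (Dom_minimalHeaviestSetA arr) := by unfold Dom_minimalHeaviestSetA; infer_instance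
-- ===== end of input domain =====

-- B replaces A's take-heaviest greedy (backward take-while that builds the subset) with a forward
-- pass over ascending prefix sums that finds the lightest prefix to DROP, then slices; equivalence
-- is about the RETURN value only (both Pythons sort `arr` in place, the same mutation).

-- ===== PORT A =====
-- the for-loop of A over range(n-1, -1, -1) with its break, state (prefixSum, subSetA, sumSubSetA)
def pvA_loop (arr : List Int) : List Int → Int → List Int → Int → List Int
  | [], _, subSetA, _ => subSetA
  | i :: rest, prefixSum, subSetA, sumSubSetA =>
    if sumSubSetA ≤ prefixSum then
      pvA_loop arr rest (prefixSum - PySem.List.pyGetD arr i 0)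
        (PySem.List.pyGetD arr i 0 :: subSetA) (sumSubSetA + PySem.List.pyGetD arr i 0)
    else subSetA

def minimalHeaviestSetA (arr : List Int) : List Int :=
  let n := arr.length
  let arr := PySem.List.sorted arr (fun x => x) false
  let prefixSum := arr.sum
  pvA_loop arr (PySem.List.pyRange ((n : Int) - 1) (-1) (-1)) prefixSum [] 0

-- ===== PORT B =====
-- Source B's single forward loop: state (p, m), 'for i, x in enumerate(arr, 1): p += x; if 2*p < total: m = i'
def minimalHeaviestSetA_alt (arr : List Int) : List Int :=
  let arr := PySem.List.sorted arr (fun x => x) false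
  let total := arr.sum
  let st := (PySem.List.enumerate arr 1).foldl
      (fun (q : Int × Int) ix =>
        let p := q.1 + ix.2
        (p, if 2 * p < total then ix.1 else q.2)) (0, 0)
  PySem.List.slice arr (some st.2) none

-- ===== PRECONDITION & SPEC =====
def Spec_minimalHeaviestSetA (arr : List Int) (out : List Int) : Prop := out = minimalHeaviestSetA_alt arr
instance (arr : List Int) (out : List Int) : Decidable (Spec_minimalHeaviestSetA arr out) := by unfold Spec_minimalHeaviestSetA; infer_instance

-- ===== CLAIM (what is proved, stated in full; the proofs are below) =====
def Claim_equal_minimalHeaviestSetA : Prop := ∀ (arr : List Int), Dom_minimalHeaviestSetA arr → Spec_minimalHeaviestSetA arr (minimalHeaviestSetA arr)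

-- ===== LEMMAS AND PROOFS =====

-- greedy count: how many leading elements of l A's take-while takes (2*c ≤ total rule, c = taken sum)
def pvK (total : Int) : List Int → Int → Nat
  | [], _ => 0
  | x :: xs, c => if 2 * c ≤ total then pvK total xs (c + x) + 1 else 0

theorem pvK_le (total : Int) : ∀ (l : List Int) (c : Int), pvK total l c ≤ l.length := by
  intro l
  induction l with
  | nil => intro c; simp [pvK]
  | cons x xs ih =>
    intro c
    simp only [pvK, List.length_cons]
    split
    · exact Nat.succ_le_succ (ih (c + x))
    · exact Nat.zero_le _

-- the take-while count across a snoc: the last element is taken iff everything before it was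
theorem pvK_append (total : Int) : ∀ (u : List Int) (x c : Int),
    pvK total (u ++ [x]) c
      = if pvK total u c = u.length
          then (if 2 * (c + u.sum) ≤ total then u.length + 1 else u.length)
          else pvK total u c := by
  intro u
  induction u with
  | nil => intro x c; simp [pvK]
  | cons y ys ih =>
    intro x c
    simp only [List.cons_append, pvK, List.length_cons, List.sum_cons]
    by_cases h : 2 * c ≤ total
    · rw [if_pos h, if_pos h, ih]
      by_cases hk : pvK total ys (c + y) = ys.length
      · rw [if_pos hk, if_pos (show pvK total ys (c + y) + 1 = ys.length + 1 by omega)]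
        rw [show c + (y + ys.sum) = c + y + ys.sum by ring]
        by_cases hc2 : 2 * (c + y + ys.sum) ≤ total
        · rw [if_pos hc2, if_pos hc2]
        · rw [if_neg hc2, if_neg hc2]
      · rw [if_neg hk, if_neg (show ¬ pvK total ys (c + y) + 1 = ys.length + 1 by omega)]
    · rw [if_neg h, if_neg h, if_neg (show ¬ 0 = ys.length + 1 by omega)]

-- B's fold result m, given the consumed prefix sum p and next index i, is the cut position n - k
theorem pvB_fold_eq (total : Int) : ∀ (l : List Int) (p i m c0 : Int),
    c0 = total - (p + l.sum) →
    ((PySem.List.enumerate l i).foldl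
        (fun (q : Int × Int) ix =>
          let p' := q.1 + ix.2
          (p', if 2 * p' < total then ix.1 else q.2)) (p, m)).2
      = if pvK total l.reverse c0 = l.length then m
        else (i - 1) + ((l.length : Int) - (pvK total l.reverse c0 : Int)) := by
  intro l
  induction l with
  | nil => intro p i m c0 _; simp [PySem.List.enumerate_nil, pvK]
  | cons x xs ih =>
    intro p i m c0 hc0
    simp only [PySem.List.enumerate_cons, List.foldl_cons, List.reverse_cons, List.length_cons,
      List.sum_cons] at *
    rw [pvK_append]
    rw [ih (p + x) (i + 1) (if 2 * (p + x) < total then i else m) c0 (by omega)]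
    simp only [List.length_reverse]
    have hx : c0 + xs.reverse.sum = total - p - x := by
      rw [List.sum_reverse]; omega
    have hle := pvK_le total xs.reverse c0
    simp only [List.length_reverse] at hle
    by_cases hk : pvK total xs.reverse c0 = xs.length
    · rw [if_pos hk, if_pos hk]
      by_cases hcond : 2 * (c0 + xs.reverse.sum) ≤ total
      · rw [if_pos hcond, if_pos rfl, if_neg (show ¬ 2 * (p + x) < total by omega)]
      · rw [if_neg hcond, if_neg (show ¬ xs.length = xs.length + 1 by omega),
          if_pos (show 2 * (p + x) < total by omega)]
        push_cast
        ring
    · rw [if_neg hk, if_neg hk, if_neg (show ¬ pvK total xs.reverse c0 = xs.length + 1 by omega)]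
      push_cast
      ring

-- A's loop over an element list, with the invariant ps + ss = total, is take-then-reverse
theorem pvA_loopR_eq (total : Int) : ∀ (l : List Int) (ps ss : Int) (sub : List Int),
    ps + ss = total →
    (l.foldr (fun x cont => fun (ps : Int) (sub : List Int) (ss : Int) =>
        if ss ≤ ps then cont (ps - x) (x :: sub) (ss + x) else sub)
      (fun _ sub _ => sub)) ps sub ss
      = (l.take (pvK total l ss)).reverse ++ sub := by
  intro l
  induction l with
  | nil => intro ps ss sub _; simp
  | cons x xs ih =>
    intro ps ss sub hinv
    simp only [List.foldr_cons, pvK]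
    by_cases h : ss ≤ ps
    · rw [if_pos h, if_pos (by omega)]
      rw [ih (ps - x) (ss + x) (x :: sub) (by omega)]
      simp
    · rw [if_neg h, if_neg (by omega)]
      simp

-- pvA_loop over an index list is the same foldr-loop over the fetched elements
theorem pvA_loop_eq_foldr (arr : List Int) : ∀ (is : List Int) (ps ss : Int) (sub : List Int),
    pvA_loop arr is ps sub ss
      = ((is.map (fun i => PySem.List.pyGetD arr i 0)).foldr
          (fun x cont => fun (ps : Int) (sub : List Int) (ss : Int) =>
            if ss ≤ ps then cont (ps - x) (x :: sub) (ss + x) else sub)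
          (fun _ sub _ => sub)) ps sub ss := by
  intro is
  induction is with
  | nil => intro ps ss sub; simp [pvA_loop]
  | cons i rest ih =>
    intro ps ss sub
    simp only [pvA_loop, List.map_cons, List.foldr_cons]
    split
    · exact ih _ _ _
    · rfl

-- the countdown index list fetches exactly the reversed sorted array
theorem pvA_indices_rev (s : List Int) :
    (PySem.List.pyRange ((s.length : Int) - 1) (-1) (-1)).map (fun i => PySem.List.pyGetD s i 0)
      = s.reverse := by
  rw [PySem.List.pyRange_neg_one_eq_reverse]
  rw [show (-1 : Int) + 1 = 0 by ring, show (s.length : Int) - 1 + 1 = (s.length : Int) by ring]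
  rw [List.map_reverse]
  rw [PySem.List.map_pyGetD_pyRange_zero']

-- ===== VERDICT (by name: the statement is the Claim_ definition above) =====
theorem minimalHeaviestSetA_spec : Claim_equal_minimalHeaviestSetA := by
  intro arr _
  unfold Spec_minimalHeaviestSetA minimalHeaviestSetA minimalHeaviestSetA_alt
  simp only []
  set s := PySem.List.sorted arr (fun x => x) false with hs
  set total := s.sum with htotal
  have hlen : (arr.length : Int) = (s.length : Int) := by
    rw [hs]; simp [PySem.List.length_sorted]
  rw [hlen]
  -- A side: the greedy take-while keeps the last k elements
  rw [pvA_loop_eq_foldr, pvA_indices_rev, pvA_loopR_eq total s.reverse total 0 [] (by ring)]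
  set k := pvK total s.reverse 0 with hkdef
  have hk : k ≤ s.length := by
    have := pvK_le total s.reverse 0; simpa using this
  -- B side: the forward scan computes the cut position n - k
  rw [pvB_fold_eq total s 0 1 0 0 (by omega)]
  simp only [← hkdef]
  by_cases hall : k = s.length
  · rw [if_pos hall]
    rw [show (0 : Int) = ((0 : Nat) : Int) by rfl, PySem.List.slice_from_natCast]
    rw [List.append_nil, List.take_reverse, List.reverse_reverse, hall]
    simp
  · rw [if_neg hall]
    rw [show (1 : Int) - 1 + ((s.length : Int) - (k : Int))
          = ((s.length - k : Nat) : Int) by omega]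
    rw [PySem.List.slice_from_natCast]
    rw [List.append_nil, List.take_reverse, List.reverse_reverse]
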